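-- pv_equiv track=rewrite | github.com/krystofmincev/yahoo_crawler | crawler_code/NASDAQ_Crawler.py | format_text
-- ===== SOURCE A (Python) =====
-- def format_text(text):
--     """
--     input (str list):
--         text (str list) = (eg: ouput from download_text())
--     output (str list, dict):
--         tickers = ticker list
--         tickers_dict = information about ticker
--         ipos_dict = tickers with ipos in dict years
--     """
--     assert type(text) == list
--     assert type(text[0]) == str
--
--     tickers = []
--     tickers_dict = {}
--     ipos_dict = {}
--     ipos_list = []
--     for num, line in enumerate(text):
--         line = line.strip().strip('"').split('","')
--         if len(line) != 9: continue # filter unmatched format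
--         line[1] = line[1].replace(',', '').replace('.', '') #format company name
--         ticker = line[0]
--         ipo_year = line[5]
--         #store ticker
--         tickers.append(ticker)
--         #store information about ticker
--         tickers_dict[ticker] = line[1:]
--         #store ticker in ipo year
--         if ipo_year not in ipos_list:
--             ipos_list.append(ipo_year)
--             ipos_dict[ipo_year] = []
--         ipos_dict[ipo_year].append(ticker)
--
--     return(tickers, tickers_dict, ipos_dict)
-- ===== SOURCE B (Python) =====
-- def format_text(text):
--     assert type(text) == list
--     assert type(text[0]) == str
--
--     # pass 1: parse lines into records (ticker, info, ipo_year) in input order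
--     records = []
--     for raw in text:
--         parts = raw.strip().strip('"').split('","')
--         if len(parts) != 9:
--             continue
--         info = [parts[1].replace(',', '').replace('.', '')] + parts[2:]
--         records.append((parts[0], info, parts[5]))
--
--     # pass 2: derive each output from the records
--     tickers = [r[0] for r in records]
--     tickers_dict = {r[0]: r[1] for r in records}
--     ipos_dict = {}
--     for ticker, _info, year in records:
--         ipos_dict.setdefault(year, []).append(ticker)
--
--     return (tickers, tickers_dict, ipos_dict)
-- ===== Notes on version B (the rewrite author's own statement) =====
-- stated objective: simpler
-- what changed: A interleaves parsing and building all three outputs (plus a shadow ipos_list for membership) in one stateful loop; B first parses lines into a record list, then derives tickers, tickers_dict and ipos_dict in separate passes, with setdefault-based grouping replacing the ipos_list/ipos_dict pair.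
import Mathlib
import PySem

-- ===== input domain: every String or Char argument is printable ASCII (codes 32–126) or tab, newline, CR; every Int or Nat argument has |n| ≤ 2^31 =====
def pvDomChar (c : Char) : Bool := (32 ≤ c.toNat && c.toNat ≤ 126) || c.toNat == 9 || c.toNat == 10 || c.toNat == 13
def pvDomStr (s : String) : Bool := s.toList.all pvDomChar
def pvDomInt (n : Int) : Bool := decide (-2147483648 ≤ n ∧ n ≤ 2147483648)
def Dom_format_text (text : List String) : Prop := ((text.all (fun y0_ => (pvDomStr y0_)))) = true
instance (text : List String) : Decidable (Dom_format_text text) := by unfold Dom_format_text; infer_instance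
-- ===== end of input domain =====

-- B re-decomposes A's single stateful loop into a parse pass producing records plus
-- separate derivation passes for each output (objective: simpler decomposition, same cost).

-- ===== PORT A =====
-- shared line parsing: line.strip().strip('"').split('","')
-- (the separator '","' is nonempty, so Python's split never raises: getD [] is exact)
def pvParse (s : String) : List String :=
  (PySem.Str.split? (PySem.Str.stripChars (PySem.Str.strip s) "\"") "\",\"").getD []

-- shared company-name cleaning: x.replace(',', '').replace('.', '')
def pvClean (s : String) : String :=
  PySem.Str.replace (PySem.Str.replace s "," "") "." ""

-- one iteration of A's loop over `text`; state = (tickers, tickers_dict, ipos_dict, ipos_list)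
-- (indices 0, 1, 5 and the assignment line[1] = … are in range because len(line) = 9: getD/set are exact)
def pvStepA (st : List String × PySem.Dict String (List String) × PySem.Dict String (List String) × List String)
    (s : String) : List String × PySem.Dict String (List String) × PySem.Dict String (List String) × List String :=
  let line := pvParse s
  if line.length ≠ 9 then st
  else
    let line := line.set 1 (pvClean (line.getD 1 ""))
    let ticker := line.getD 0 ""
    let ipo_year := line.getD 5 ""
    let tickers := st.1 ++ [ticker]
    let td := st.2.1.insert ticker (PySem.List.slice line (some 1) none)
    if ipo_year ∈ st.2.2.2 then
      (tickers, td, st.2.2.1.modify ipo_year [] (· ++ [ticker]), st.2.2.2)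
    else
      (tickers, td, (st.2.2.1.insert ipo_year []).modify ipo_year [] (· ++ [ticker]), st.2.2.2 ++ [ipo_year])

def format_text (text : List String) : List String × (List (String × List String)) × (List (String × List String)) :=
  let st := text.foldl pvStepA ([], PySem.Dict.empty, PySem.Dict.empty, [])
  (st.1, st.2.1.items, st.2.2.1.items)

-- ===== PORT B =====
-- a record (ticker, info, ipo_year) from the split parts of one well-formed line
def pvRec (parts : List String) : String × List String × String :=
  (parts.getD 0 "", pvClean (parts.getD 1 "") :: parts.drop 2, parts.getD 5 "")

def format_text_alt (text : List String) : List String × (List (String × List String)) × (List (String × List String)) :=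
  let records := text.foldl
    (fun acc s => if ((pvParse s).length == 9) = true then acc ++ [pvRec (pvParse s)] else acc) []
  let tickers := records.map (·.1)
  let td := records.foldl (fun d r => d.insert r.1 r.2.1)
    (PySem.Dict.empty : PySem.Dict String (List String))
  let idict := records.foldl (fun d r => (d.setdefault r.2.2 []).modify r.2.2 [] (· ++ [r.1]))
    (PySem.Dict.empty : PySem.Dict String (List String))
  (tickers, td.items, idict.items)

-- ===== PRECONDITION & SPEC =====
-- Pre_ excludes only the empty list, on which both Pythons raise (IndexError at text[0] in the assert).
def Pre_format_text (text : List String) : Prop := text ≠ []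
instance (text : List String) : Decidable (Pre_format_text text) := by unfold Pre_format_text; infer_instance
def pvWitness_format_text : List String := ["\"A\",\"B.C, Inc.\",\"c\",\"d\",\"e\",\"1999\",\"g\",\"h\",\"i\""]

def Spec_format_text (text : List String) (out : List String × (List (String × List String)) × (List (String × List String))) : Prop := out = format_text_alt text
instance (text : List String) (out : List String × (List (String × List String)) × (List (String × List String))) : Decidable (Spec_format_text text out) := by unfold Spec_format_text; infer_instance

-- ===== CLAIM (what is proved, stated in full; the proofs are below) =====
def Claim_equal_format_text : Prop := ∀ (text : List String), Dom_format_text text → Pre_format_text text → Spec_format_text text (format_text text)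

-- ===== LEMMAS AND PROOFS =====

-- B's two group steps, at the record level
def pvIns (d : PySem.Dict String (List String)) (r : String × List String × String) :
    PySem.Dict String (List String) := d.insert r.1 r.2.1
def pvGrp (d : PySem.Dict String (List String)) (r : String × List String × String) :
    PySem.Dict String (List String) := (d.setdefault r.2.2 []).modify r.2.2 [] (· ++ [r.1])

-- the record list B builds, in filter/map form
def pvRecords (text : List String) : List (String × List String × String) :=
  (text.filter (fun s => (pvParse s).length == 9)).map (fun s => pvRec (pvParse s))

lemma pvSet9 (l : List String) (h : l.length = 9) (v : String) :
    (l.set 1 v).getD 0 "" = l.getD 0 "" ∧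
    PySem.List.slice (l.set 1 v) (some 1) none = v :: l.drop 2 ∧
    (l.set 1 v).getD 5 "" = l.getD 5 "" := by
  match l, h with
  | [a,b,c,d,e,f,g,i,j], _ =>
    refine ⟨rfl, ?_, rfl⟩
    simp [PySem.List.slice]

-- one step of A's loop, under the invariant ipos_list = ipos_dict.keys, is B's record step
set_option maxHeartbeats 1000000 in
lemma pvStepA_eq (st : List String × PySem.Dict String (List String) × PySem.Dict String (List String) × List String)
    (s : String) (h : st.2.2.2 = st.2.2.1.keys) :
    pvStepA st s =
      if ((pvParse s).length == 9) = true then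
        (st.1 ++ [(pvRec (pvParse s)).1], pvIns st.2.1 (pvRec (pvParse s)),
         pvGrp st.2.2.1 (pvRec (pvParse s)), (pvGrp st.2.2.1 (pvRec (pvParse s))).keys)
      else st := by
  obtain ⟨tk, td, idd, il⟩ := st
  simp only at h
  subst h
  generalize hP : pvParse s = l
  unfold pvStepA pvGrp pvIns pvRec
  rw [hP]
  by_cases hlen : l.length = 9
  · obtain ⟨h0, h1, h5⟩ := pvSet9 l hlen (pvClean (l.getD 1 ""))
    simp only [hlen, h0, h1, h5, beq_self_eq_true, if_true, ne_eq, not_true_eq_false, if_false]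
    by_cases hmem : l.getD 5 "" ∈ idd.keys
    · have hc : idd.contains (l.getD 5 "") = true :=
        (PySem.Dict.contains_iff_mem_keys idd _).mpr hmem
      simp only [hmem, if_true, PySem.Dict.setdefault_of_contains idd _ hc, Prod.mk.injEq]
      refine ⟨trivial, trivial, trivial, ?_⟩
      rw [PySem.Dict.keys_modify, PySem.Dict.keys_insert_of_contains idd _ hc]
    · have hc : idd.contains (l.getD 5 "") = false := by
        by_contra hx
        exact hmem ((PySem.Dict.contains_iff_mem_keys idd _).mp (by simpa using hx))
      simp only [hmem, if_false, PySem.Dict.setdefault_of_not_contains idd _ hc, Prod.mk.injEq]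
      refine ⟨trivial, trivial, trivial, ?_⟩
      rw [PySem.Dict.keys_modify,
        PySem.Dict.keys_insert_of_contains _ _ (PySem.Dict.contains_insert_self idd _ _),
        PySem.Dict.keys_insert_of_not_contains idd _ hc]
  · simp [hlen]

lemma pvLoopA (text : List String) :
    ∀ (tk : List String) (td idd : PySem.Dict String (List String)) (il : List String),
      il = idd.keys →
      text.foldl pvStepA (tk, td, idd, il) =
        (tk ++ (pvRecords text).map (·.1), (pvRecords text).foldl pvIns td,
         (pvRecords text).foldl pvGrp idd, ((pvRecords text).foldl pvGrp idd).keys) := by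
  induction text with
  | nil => intro tk td idd il h; simp [pvRecords, h]
  | cons s rest ih =>
    intro tk td idd il h
    rw [List.foldl_cons, pvStepA_eq (tk, td, idd, il) s h]
    by_cases hlen : (pvParse s).length = 9
    · simp only [hlen, beq_self_eq_true, if_true]
      rw [ih _ _ _ _ rfl]
      simp [pvRecords, hlen]
    · simp only [beq_iff_eq, hlen, if_false]
      rw [ih _ _ _ _ h]
      simp [pvRecords, hlen]

-- ===== VERDICT (by name: the statement is the Claim_ definition above) =====
theorem format_text_spec : Claim_equal_format_text := by
  intro text _ _
  unfold Spec_format_text format_text format_text_alt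
  rw [pvLoopA text [] PySem.Dict.empty PySem.Dict.empty [] (by simp)]
  rw [PySem.List.foldl_append_if (fun s => (pvParse s).length == 9) (fun s => pvRec (pvParse s)) text []]
  rfl
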